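-- pv_equiv track=rewrite | github.com/Jorextror/Python | 2n2021/1matricula/moduls_fets/img.py | im
-- ===== SOURCE A (Python) =====
-- def im(matrix,model='DISCOVER'):
--     bn=False
--     gris=False
--     for i in matrix:
--         for j in i:
--             if j == (255,255,255) or j == (0,0,0):
--                 bn=True
--             elif j[0]==j[1] and j[1]==j[2]:
--                 gris=True
--             else:
--                 return "RGB",matrix
--     if gris:
--         return "1",matrix
--     elif bn and gris:
--         return "L",matrix
-- ===== SOURCE B (Python) =====
-- def im(matrix, model='DISCOVER'):
--     if any(not (j == (255, 255, 255) or j == (0, 0, 0) or (j[0] == j[1] and j[1] == j[2]))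
--            for row in matrix for j in row):
--         return "RGB", matrix
--     if any(j != (255, 255, 255) and j != (0, 0, 0) and j[0] == j[1] and j[1] == j[2]
--            for row in matrix for j in row):
--         return "1", matrix
-- ===== Notes on version B (the rewrite author's own statement) =====
-- stated objective: idiomatic
-- what changed: Replaced the flag-carrying double loop with early return by two short-circuiting any() scans over the flattened pixels (RGB pixel present, then gray non-black/white pixel present); the dead 'L' branch and the bn flag disappear.
import Mathlib
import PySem

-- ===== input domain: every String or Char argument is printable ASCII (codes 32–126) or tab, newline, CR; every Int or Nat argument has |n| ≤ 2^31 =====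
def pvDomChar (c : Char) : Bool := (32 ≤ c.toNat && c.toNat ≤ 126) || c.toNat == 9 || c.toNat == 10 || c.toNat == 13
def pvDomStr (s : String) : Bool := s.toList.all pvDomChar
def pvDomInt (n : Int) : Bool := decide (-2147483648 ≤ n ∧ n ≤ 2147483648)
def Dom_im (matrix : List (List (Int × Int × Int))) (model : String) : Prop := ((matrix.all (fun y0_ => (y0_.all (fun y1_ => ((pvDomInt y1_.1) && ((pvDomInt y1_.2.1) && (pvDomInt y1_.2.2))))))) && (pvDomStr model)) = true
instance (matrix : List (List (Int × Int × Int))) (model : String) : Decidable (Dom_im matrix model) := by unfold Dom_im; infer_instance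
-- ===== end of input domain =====

-- B replaces A's flag-carrying double loop by two short-circuiting any() passes over the pixels (idiomatic; same cost).

-- ===== PORT A =====
-- inner 'for j in i' loop: carries the bn/gris flags, returns none on the early 'return "RGB"'
def imInner : List (Int × Int × Int) → Bool → Bool → Option (Bool × Bool)
  | [], bn, gris => some (bn, gris)
  | j :: rest, bn, gris =>
    if j = (255, 255, 255) ∨ j = (0, 0, 0) then imInner rest true gris
    else if j.1 = j.2.1 ∧ j.2.1 = j.2.2 then imInner rest bn true
    else none

-- outer 'for i in matrix' loop
def imOuter : List (List (Int × Int × Int)) → Bool → Bool → Option (Bool × Bool)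
  | [], bn, gris => some (bn, gris)
  | i :: rest, bn, gris =>
    match imInner i bn gris with
    | none => none
    | some (bn', gris') => imOuter rest bn' gris'

def im (matrix : List (List (Int × Int × Int))) (model : String) : Option (String × (List (List (Int × Int × Int)))) :=
  match imOuter matrix false false with
  | none => some ("RGB", matrix)
  | some (bn, gris) =>
    if gris then some ("1", matrix)
    else if bn ∧ gris then some ("L", matrix)
    else none

-- ===== PORT B =====
def im_alt (matrix : List (List (Int × Int × Int))) (model : String) : Option (String × (List (List (Int × Int × Int)))) :=
  if matrix.any (fun row => row.any (fun j =>
      !(j == (255, 255, 255) || j == (0, 0, 0) || (j.1 == j.2.1 && j.2.1 == j.2.2)))) then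
    some ("RGB", matrix)
  else if matrix.any (fun row => row.any (fun j =>
      j != (255, 255, 255) && j != (0, 0, 0) && j.1 == j.2.1 && j.2.1 == j.2.2)) then
    some ("1", matrix)
  else
    none

-- ===== PRECONDITION & SPEC =====
def Spec_im (matrix : List (List (Int × Int × Int))) (model : String) (out : Option (String × (List (List (Int × Int × Int))))) : Prop := out = im_alt matrix model
instance (matrix : List (List (Int × Int × Int))) (model : String) (out : Option (String × (List (List (Int × Int × Int))))) : Decidable (Spec_im matrix model out) := by unfold Spec_im; infer_instance

-- ===== CLAIM (what is proved, stated in full; the proofs are below) =====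
def Claim_equal_im : Prop := ∀ (matrix : List (List (Int × Int × Int))) (model : String), Dom_im matrix model → Spec_im matrix model (im matrix model)

-- ===== LEMMAS AND PROOFS =====

-- abbreviations used only by the proofs
def pvP (j : Int × Int × Int) : Bool :=
  !(j == (255, 255, 255) || j == (0, 0, 0) || (j.1 == j.2.1 && j.2.1 == j.2.2))
def pvQ (j : Int × Int × Int) : Bool :=
  j != (255, 255, 255) && j != (0, 0, 0) && j.1 == j.2.1 && j.2.1 == j.2.2
def pvBW (j : Int × Int × Int) : Bool :=
  j == (255, 255, 255) || j == (0, 0, 0)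

theorem imInner_eq (ps : List (Int × Int × Int)) (bn gris : Bool) :
    imInner ps bn gris =
      if ps.any pvP then none else some (bn || ps.any pvBW, gris || ps.any pvQ) := by
  induction ps generalizing bn gris with
  | nil => simp [imInner]
  | cons j rest ih =>
    simp only [imInner, List.any_cons]
    by_cases h1 : j = (255, 255, 255) ∨ j = (0, 0, 0)
    · have hP : pvP j = false := by
        rcases h1 with h | h <;> simp [pvP, h]
      have hQ : pvQ j = false := by
        rcases h1 with h | h <;> simp [pvQ, h]
      have hBW : pvBW j = true := by
        rcases h1 with h | h <;> simp [pvBW, h]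
      simp [h1, ih, hP, hQ, hBW]
      rw [hP, Bool.false_or]
    · by_cases h2 : j.1 = j.2.1 ∧ j.2.1 = j.2.2
      · have hP : pvP j = false := by simp [pvP, h2.1, h2.2]
        have hQ : pvQ j = true := by
          push Not at h1
          simp [pvQ, h1.1, h1.2, h2.1, h2.2]
        have hBW : pvBW j = false := by
          push Not at h1
          simp [pvBW, h1.1, h1.2]
        simp [h1, h2, ih, hP, hQ, hBW]
        rw [hP, Bool.false_or]
      · have hP : pvP j = true := by
          push Not at h1
          simp only [pvP, Bool.not_eq_true']
          simp [h1.1, h1.2]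
          intro ha hb
          exact h2 ⟨ha, hb⟩
        simp [h1, h2, hP]

theorem imOuter_eq (rows : List (List (Int × Int × Int))) (bn gris : Bool) :
    imOuter rows bn gris =
      if rows.any (fun r => r.any pvP) then none
      else some (bn || rows.any (fun r => r.any pvBW), gris || rows.any (fun r => r.any pvQ)) := by
  induction rows generalizing bn gris with
  | nil => simp [imOuter]
  | cons r rest ih =>
    simp only [imOuter, imInner_eq, List.any_cons]
    by_cases h : r.any pvP = true
    · simp [h]
    · rw [Bool.not_eq_true] at h
      simp [h, ih, Bool.or_assoc]
      rw [h, Bool.false_or]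

-- ===== VERDICT (by name: the statement is the Claim_ definition above) =====
theorem im_spec : Claim_equal_im := by
  intro matrix model _
  unfold Spec_im im im_alt
  rw [imOuter_eq]
  have e1 : (matrix.any fun row => row.any fun j =>
      !(j == (255, 255, 255) || j == (0, 0, 0) || (j.1 == j.2.1 && j.2.1 == j.2.2)))
      = matrix.any (fun r => r.any pvP) := rfl
  have e2 : (matrix.any fun row => row.any fun j =>
      j != (255, 255, 255) && j != (0, 0, 0) && j.1 == j.2.1 && j.2.1 == j.2.2)
      = matrix.any (fun r => r.any pvQ) := rfl
  rw [e1, e2]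
  by_cases hP : matrix.any (fun r => r.any pvP) = true
  · simp [hP]
  · rw [Bool.not_eq_true] at hP
    by_cases hQ : matrix.any (fun r => r.any pvQ) = true
    · simp [hP, hQ]
    · rw [Bool.not_eq_true] at hQ
      simp [hP, hQ]
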